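-- pv_equiv track=rewrite | github.com/Mondego/pyreco | repoData/jorgenschaefer-elpy/allPythonContent.py | linecol_to_pos
-- ===== SOURCE A (Python) =====
-- def linecol_to_pos(text, line, col):
--     """Return the offset of this line and column in text.
--
--     Lines are one-based, columns zero-based.
--
--     This is how Jedi wants it. Don't ask me why.
--
--     """
--     nth_newline_offset = 0
--     for i in range(line - 1):
--         new_offset = text.find("\n", nth_newline_offset)
--         if new_offset < 0:
--             raise ValueError("Text does not have {0} lines."
--                              .format(line))
--         nth_newline_offset = new_offset + 1
--     offset = nth_newline_offset + col
--     if offset > len(text):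
--         raise ValueError("Line {0} column {1} is not within the text"
--                          .format(line, col))
--     return offset
-- ===== SOURCE B (Python) =====
-- def linecol_to_pos(text, line, col):
--     """Return the offset of this line and column in text.
--
--     Lines are one-based, columns zero-based.
--     """
--     lines = text.split("\n")
--     if line > len(lines):
--         raise ValueError("Text does not have {0} lines."
--                          .format(line))
--     offset = sum(len(lines[i]) + 1 for i in range(line - 1)) + col
--     if offset > len(text):
--         raise ValueError("Line {0} column {1} is not within the text"
--                          .format(line, col))
--     return offset
-- ===== Notes on version B (the rewrite author's own statement) =====
-- stated objective: simpler
-- what changed: Replaces the stateful find-loop that walks newline offsets one by one with a single text.split('\n') followed by arithmetic: line count is checked against len(lines) and the line-start offset is the sum of piece lengths plus one newline each.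
import Mathlib
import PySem

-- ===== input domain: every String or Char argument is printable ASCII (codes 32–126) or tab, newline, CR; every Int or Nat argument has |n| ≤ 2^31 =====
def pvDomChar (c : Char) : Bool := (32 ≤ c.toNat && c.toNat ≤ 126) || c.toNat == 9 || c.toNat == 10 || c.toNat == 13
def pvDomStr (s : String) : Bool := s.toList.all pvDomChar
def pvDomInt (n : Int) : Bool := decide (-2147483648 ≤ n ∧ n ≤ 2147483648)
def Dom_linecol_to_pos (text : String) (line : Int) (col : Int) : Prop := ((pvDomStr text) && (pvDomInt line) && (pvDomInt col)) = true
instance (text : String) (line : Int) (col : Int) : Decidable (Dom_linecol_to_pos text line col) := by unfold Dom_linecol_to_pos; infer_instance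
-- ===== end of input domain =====

-- B replaces A's stateful newline-offset find loop by one split("\n") plus arithmetic on piece
-- lengths (objective: simpler). Equivalence of the RETURN value is proved on Pre_ (A returns there).

-- ===== PORT A =====
def linecol_to_pos (text : String) (line : Int) (col : Int) : Int :=
  let st := (PySem.List.pyRange 0 (line - 1) 1).foldl
    (fun st _ =>
      match st with
      | none => none
      | some nthNewlineOffset =>
        let newOffset := PySem.Str.findFrom text "\n" nthNewlineOffset
        if newOffset < 0 then none          -- raise ValueError "Text does not have {line} lines."
        else some (newOffset + 1))
    (some (0 : Int))
  match st with
  | none => 0                               -- unreachable under Pre_ (ValueError)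
  | some nthNewlineOffset =>
    let offset := nthNewlineOffset + col
    if offset > PySem.Str.len text then 0   -- unreachable under Pre_ (ValueError)
    else offset

-- ===== PORT B =====
def linecol_to_pos_alt (text : String) (line : Int) (col : Int) : Int :=
  let lines := PySem.Chars.splitOn text.toList ['\n']   -- text.split("\n")
  if line > (lines.length : Int) then 0                 -- unreachable under Pre_ (ValueError)
  else
    let offset := (PySem.List.pyRange 0 (line - 1) 1).foldl
      (fun acc i => acc + (((PySem.List.pyGetD lines i []).length : Int) + 1)) 0 + col
    if offset > PySem.Str.len text then 0               -- unreachable under Pre_ (ValueError)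
    else offset

-- ===== PRECONDITION & SPEC =====
-- Pre_ excludes exactly the inputs on which A raises ValueError: line beyond the number of
-- split("\n") pieces, or an offset past the end of the text.
def Pre_linecol_to_pos (text : String) (line : Int) (col : Int) : Prop :=
  let ps := PySem.Chars.splitOn text.toList ['\n']
  line ≤ (ps.length : Int) ∧
  ((ps.take (line - 1).toNat).map (fun p => (p.length : Int) + 1)).sum + col
    ≤ (text.toList.length : Int)
instance (text : String) (line : Int) (col : Int) : Decidable (Pre_linecol_to_pos text line col) := by
  unfold Pre_linecol_to_pos; infer_instance
def pvWitness_linecol_to_pos : String × Int × Int := ("ab\ncd", 2, 1)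

def Spec_linecol_to_pos (text : String) (line : Int) (col : Int) (out : Int) : Prop := out = linecol_to_pos_alt text line col
instance (text : String) (line : Int) (col : Int) (out : Int) : Decidable (Spec_linecol_to_pos text line col out) := by unfold Spec_linecol_to_pos; infer_instance

-- ===== CLAIM (what is proved, stated in full; the proofs are below) =====
def Claim_equal_linecol_to_pos : Prop := ∀ (text : String) (line : Int) (col : Int), Dom_linecol_to_pos text line col → Pre_linecol_to_pos text line col → Spec_linecol_to_pos text line col (linecol_to_pos text line col)

-- ===== LEMMAS AND PROOFS =====

-- reference splitter: pvSplit cur s = the pieces of (cur.reverse ++ s) split on '\n'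
def pvSplit : List Char → List Char → List (List Char)
  | cur, [] => [cur.reverse]
  | cur, c :: r => if c = '\n' then cur.reverse :: pvSplit [] r else pvSplit (c :: cur) r

-- reference offset chain: pvChain n t = offset after n successful find('\n')+1 steps from 0 in t
def pvChain : Nat → List Char → Option Nat
  | 0, _ => some 0
  | n + 1, t =>
    let j := PySem.Chars.find t ['\n']
    if j < 0 then none
    else (pvChain n (t.drop (j.toNat + 1))).map (fun m => m + j.toNat + 1)

theorem pvFind_go_succ (t : List Char) (k : Nat) :
    PySem.Chars.find.go ['\n'] t (k + 1) =
      if PySem.Chars.find.go ['\n'] t k = -1 then -1 else PySem.Chars.find.go ['\n'] t k + 1 := by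
  induction t generalizing k with
  | nil => simp [PySem.Chars.find.go]
  | cons c t ih =>
    by_cases hc : ['\n'].isPrefixOf (c :: t) = true
    · simp [PySem.Chars.find.go, hc]
    · simp only [PySem.Chars.find.go, hc]
      simpa using ih (k + 1)

theorem pvFind_cons (c : Char) (t : List Char) :
    PySem.Chars.find (c :: t) ['\n'] =
      if c = '\n' then 0
      else if PySem.Chars.find t ['\n'] = -1 then -1 else PySem.Chars.find t ['\n'] + 1 := by
  by_cases hc : c = '\n'
  · subst hc; simp [PySem.Chars.find, PySem.Chars.find.go]
  · have hp : (['\n'].isPrefixOf (c :: t)) = false := by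
      simp [List.isPrefixOf, Ne.symm hc]
    simp only [PySem.Chars.find, PySem.Chars.find.go, hp, if_neg hc]
    simpa using pvFind_go_succ t 0

theorem pvFind_lt_length {t : List Char} (h : 0 ≤ PySem.Chars.find t ['\n']) :
    (PySem.Chars.find t ['\n']).toNat < t.length := by
  have hs := (PySem.Chars.find_spec (s := t) (sub := ['\n']) h).1
  have hne : t.drop (PySem.Chars.find t ['\n']).toNat ≠ [] := by
    intro he; rw [he] at hs; exact absurd (List.IsPrefix.length_le hs) (by simp)
  have := List.drop_eq_nil_iff.not.mp (by simpa using hne)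
  omega

-- pvSplit unrolled one piece at a time, via find
theorem pvSplit_eq_find (s : List Char) : ∀ cur,
    pvSplit cur s =
      if PySem.Chars.find s ['\n'] < 0 then [cur.reverse ++ s]
      else (cur.reverse ++ s.take (PySem.Chars.find s ['\n']).toNat) ::
            pvSplit [] (s.drop ((PySem.Chars.find s ['\n']).toNat + 1)) := by
  induction s with
  | nil => intro cur; simp [pvSplit, PySem.Chars.find, PySem.Chars.find.go]
  | cons c t ih =>
    intro cur
    rw [pvFind_cons]
    by_cases hc : c = '\n'
    · subst hc; simp [pvSplit]
    · have hm1 : (-1 : Int) ≤ PySem.Chars.find t ['\n'] := PySem.Chars.neg_one_le_find t _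
      by_cases hf : PySem.Chars.find t ['\n'] = -1
      · simp only [pvSplit, if_neg hc, ih (c :: cur), hf]
        simp
      · have h0 : 0 ≤ PySem.Chars.find t ['\n'] := by omega
        have ht : (PySem.Chars.find t ['\n'] + 1).toNat = (PySem.Chars.find t ['\n']).toNat + 1 := by omega
        simp only [pvSplit, if_neg hc, ih (c :: cur), if_neg (by omega : ¬ PySem.Chars.find t ['\n'] < 0),
          if_neg hf]
        rw [if_neg (by omega : ¬ PySem.Chars.find t ['\n'] + 1 < 0)]
        simp [ht, List.take_succ_cons]

theorem pvSplit_ne_nil (s : List Char) : ∀ cur, pvSplit cur s ≠ [] := by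
  induction s with
  | nil => intro cur; simp [pvSplit]
  | cons c t ih => intro cur; by_cases hc : c = '\n' <;> simp [pvSplit, hc, ih]

-- PySem.Chars.splitOn agrees with the reference splitter
theorem pvSplitOn_go (fuel : Nat) : ∀ (l cur : List Char) (accs : List (List Char)),
    l.length < fuel →
    PySem.Chars.splitOn.go ['\n'] fuel l cur accs = accs.reverse ++ pvSplit cur l := by
  induction fuel with
  | zero => intro l cur accs h; omega
  | succ fuel ih =>
    intro l cur accs h
    match l with
    | [] => simp [PySem.Chars.splitOn.go, pvSplit]
    | c :: r =>
      by_cases hc : ['\n'].isPrefixOf (c :: r) = true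
      · have hcc : c = '\n' := by
          have := by simpa [List.isPrefixOf] using hc
          exact this.symm
        simp only [PySem.Chars.splitOn.go, hc, if_true, List.length_cons, List.length_nil,
          List.drop_succ_cons, List.drop_zero]
        rw [ih r [] (cur.reverse :: accs) (by simpa using Nat.lt_of_succ_lt_succ h)]
        simp [pvSplit, hcc]
      · have hcc : ¬ c = '\n' := by
          intro he; apply hc; simp [List.isPrefixOf, he]
        simp only [PySem.Chars.splitOn.go, hc]
        rw [ih r (c :: cur) accs (by simpa using Nat.lt_of_succ_lt_succ h)]
        simp [pvSplit, hcc]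

theorem pvSplitOn_eq (s : List Char) :
    PySem.Chars.splitOn s ['\n'] = pvSplit [] s := by
  have := pvSplitOn_go (s.length + 1) s [] [] (by omega)
  simpa [PySem.Chars.splitOn] using this

-- the chain computes prefix sums of the split pieces (+1 per newline)
theorem pvChain_pieces (n : Nat) : ∀ s : List Char,
    pvChain n s =
      if n < (pvSplit [] s).length
      then some (((pvSplit [] s).take n).map (fun p => p.length + 1)).sum
      else none := by
  induction n with
  | zero =>
    intro s
    simp [pvChain, List.length_pos_iff.mpr (pvSplit_ne_nil s [])]
  | succ n ih =>
    intro s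
    rw [pvChain, pvSplit_eq_find s []]
    by_cases hf : PySem.Chars.find s ['\n'] < 0
    · simp [hf]
    · have h0 : 0 ≤ PySem.Chars.find s ['\n'] := by omega
      have hlt := pvFind_lt_length h0
      have htk : (s.take (PySem.Chars.find s ['\n']).toNat).length
          = (PySem.Chars.find s ['\n']).toNat := by simp; omega
      simp only [hf, if_false, ih (s.drop ((PySem.Chars.find s ['\n']).toNat + 1))]
      by_cases hn : n < (pvSplit [] (s.drop ((PySem.Chars.find s ['\n']).toNat + 1))).length
      · simp [hn, htk]; omega
      · simp [hn]

-- A's loop step, as a function of the state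
def pvStep (text : String) (st : Option Int) : Option Int :=
  match st with
  | none => none
  | some nthNewlineOffset =>
    let newOffset := PySem.Str.findFrom text "\n" nthNewlineOffset
    if newOffset < 0 then none else some (newOffset + 1)

theorem pvStep_iterate_none (text : String) (n : Nat) : (pvStep text)^[n] none = none :=
  Function.iterate_fixed rfl n

theorem pvStep_iterate (text : String) (n : Nat) : ∀ k : Nat, k ≤ text.toList.length →
    (pvStep text)^[n] (some (k : Int)) =
      (pvChain n (text.toList.drop k)).map (fun m => ((k + m : Nat) : Int)) := by
  induction n with
  | zero => intro k hk; simp [pvChain]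
  | succ n ih =>
    intro k hk
    rw [Function.iterate_succ_apply]
    have hstep : pvStep text (some (k : Int)) =
        (if PySem.Chars.find (text.toList.drop k) ['\n'] = -1 then none
         else some ((k : Int) + PySem.Chars.find (text.toList.drop k) ['\n'] + 1)) := by
      simp only [pvStep]
      rw [show PySem.Str.findFrom text "\n" (k : Int) = PySem.Chars.findFrom text.toList ['\n'] (k : Int) by
        simp [PySem.Str.findFrom_eq]]
      rw [PySem.Chars.findFrom_natCast text.toList ['\n'] k hk]
      have hm1 := PySem.Chars.neg_one_le_find (text.toList.drop k) ['\n']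
      by_cases hf : PySem.Chars.find (text.toList.drop k) ['\n'] = -1
      · simp [hf]
      · have : ¬ ((k : Int) + PySem.Chars.find (text.toList.drop k) ['\n'] < 0) := by omega
        simp [hf, this]
    rw [hstep]
    by_cases hf : PySem.Chars.find (text.toList.drop k) ['\n'] = -1
    · rw [if_pos hf, pvStep_iterate_none]
      rw [pvChain]
      simp [hf]
    · have h0 : 0 ≤ PySem.Chars.find (text.toList.drop k) ['\n'] := by
        have := PySem.Chars.neg_one_le_find (text.toList.drop k) ['\n']; omega
      have hlt := pvFind_lt_length h0
      have hlen : (text.toList.drop k).length = text.toList.length - k := by simp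
      set j : Nat := (PySem.Chars.find (text.toList.drop k) ['\n']).toNat with hj
      have hcast : (k : Int) + PySem.Chars.find (text.toList.drop k) ['\n'] + 1 = ((k + j + 1 : Nat) : Int) := by
        push_cast; omega
      rw [if_neg hf, hcast, ih (k + j + 1) (by omega)]
      rw [pvChain]
      simp only [if_neg (by omega : ¬ PySem.Chars.find (text.toList.drop k) ['\n'] < 0)]
      rw [show text.toList.drop (k + j + 1) = (text.toList.drop k).drop (j + 1) by
        rw [List.drop_drop]; ring_nf]
      rw [Option.map_map]
      apply Option.map_congr
      intro m _
      simp only [Function.comp_apply]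
      push_cast; omega

-- fold over a range of getD values is the sum over the taken prefix
theorem pvPyRange_nonneg_len (b : Int) :
    PySem.List.pyRange 0 b 1 = (List.range b.toNat).map (fun k => (k : Int)) := by
  rw [PySem.List.pyRange_of_pos 0 b (by norm_num)]
  have h1 : (if (0 : Int) < b then ((b - 0 + 1 - 1) / 1).toNat else 0) = b.toNat := by
    have hb0 : b - 0 + 1 - 1 = b := by ring
    rw [hb0, Int.ediv_one]
    split <;> omega
  rw [h1]
  simp only [zero_add, one_mul]
  generalize List.range b.toNat = l
  induction l with
  | nil => simp
  | cons x l ih => simp_all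

-- ===== VERDICT (by name: the statement is the Claim_ definition above) =====
theorem linecol_to_pos_spec : Claim_equal_linecol_to_pos := by
  intro text line col hdom hpre
  obtain ⟨hpre1, hpre2⟩ := hpre
  unfold Spec_linecol_to_pos linecol_to_pos linecol_to_pos_alt
  rw [pvSplitOn_eq] at hpre1 hpre2 ⊢
  set s := text.toList with hs
  set ps := pvSplit [] s with hps
  set n : Nat := (line - 1).toNat with hn
  have hlenpos : 0 < ps.length := List.length_pos_iff.mpr (pvSplit_ne_nil s [])
  have hnlt : n < ps.length := by omega
  -- A's fold is n iterations of pvStep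
  have hfoldA : (PySem.List.pyRange 0 (line - 1) 1).foldl
      (fun st _ =>
        match st with
        | none => none
        | some nthNewlineOffset =>
          let newOffset := PySem.Str.findFrom text "\n" nthNewlineOffset
          if newOffset < 0 then none else some (newOffset + 1))
      (some (0 : Int)) = (pvStep text)^[n] (some ((0 : Nat) : Int)) := by
    show (PySem.List.pyRange 0 (line - 1) 1).foldl (fun st _ => pvStep text st) (some (0 : Int))
      = (pvStep text)^[n] (some ((0 : Nat) : Int))
    rw [List.foldl_const (pvStep text) _ _]
    congr 1
    rw [pvPyRange_nonneg_len]; simp [hn]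
  have hchain := pvStep_iterate text n 0 (by omega)
  simp only [Nat.zero_add, List.drop_zero] at hchain
  rw [hfoldA, hchain]
  rw [pvChain_pieces n s, ← hps, if_pos hnlt]
  -- B's fold is the same prefix sum
  have hsum : (PySem.List.pyRange 0 (line - 1) 1).foldl
      (fun acc i => acc + (((PySem.List.pyGetD ps i []).length : Int) + 1)) 0
      = ((ps.take n).map (fun p => (p.length : Int) + 1)).sum := by
    by_cases hl1 : line ≤ 0
    · have hn0 : n = 0 := by omega
      have hempty : PySem.List.pyRange 0 (line - 1) 1 = [] := by
        rw [pvPyRange_nonneg_len]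
        have : (line - 1).toNat = 0 := by omega
        simp [this]
      rw [hempty, hn0]
      simp
    · have hq : (line - 1) = ((ps.take n).length : Int) := by
        have : (ps.take n).length = n := by simp; omega
        rw [this]; omega
      have hlenq : PySem.List.len (ps.take n) = ((ps.take n).length : Int) := rfl
      rw [show PySem.List.pyRange 0 (line - 1) 1
            = PySem.List.pyRange 0 (PySem.List.len (ps.take n)) 1 by rw [hlenq, ← hq]]
      rw [PySem.List.foldl_congr_mem _ _
        (fun acc j => acc + (((PySem.List.pyGetD (ps.take n) j []).length : Int) + 1)) _ ?_]
      · rw [PySem.List.foldl_pyRange_pyGetD (ps.take n) []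
          (fun acc p => acc + ((p.length : Int) + 1)) 0 (le_refl 0)]
        simp only [Int.toNat_zero, List.drop_zero]
        rw [PySem.List.foldl_add]
        simp
      · intro acc j hj
        rw [PySem.List.mem_pyRange_one, hlenq] at hj
        have hjn : j.toNat < (ps.take n).length := by omega
        have hje : j = ((j.toNat : Nat) : Int) := by omega
        rw [hje]
        simp only [PySem.List.pyGetD_natCast]
        rw [List.getD_eq_getElem ps [] (by simp at hjn ⊢; omega),
            List.getD_eq_getElem (ps.take n) [] hjn]
        rw [List.getElem_take]
  have hsumNat : ((((ps.take n).map (fun p => p.length + 1)).sum : Nat) : Int)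
      = ((ps.take n).map (fun p => (p.length : Int) + 1)).sum := by
    rw [Nat.cast_list_sum, List.map_map]
    congr 1
  have hguard : ¬ (line > (ps.length : Int)) := by omega
  have hlen : PySem.Str.len text = (text.toList.length : Int) := by
    simp
  have hguard2 : ¬ (((ps.take n).map (fun p => (p.length : Int) + 1)).sum + col > PySem.Str.len text) := by
    rw [hlen, ← hs]; omega
  simp only [Option.map_some]
  rw [hsum, if_neg hguard, hsumNat]
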